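-- pv_equiv track=rewrite | github.com/MrBrantCode/unitest_baseline | mut_generate/mist_train_cf/cf_56650/solution.py | createMinHeap
-- ===== SOURCE A (Python) =====
-- def createMinHeap(arr):
--     def minHeapify(arr, n, i, swaps):
--         smallest = i
--         left = 2 * i + 1
--         right = 2 * i + 2
--
--         if left < n and arr[i] > arr[left]:
--             smallest = left
--
--         if right < n and arr[smallest] > arr[right]:
--             smallest = right
--
--         if smallest != i:
--             arr[i], arr[smallest] = arr[smallest], arr[i]
--             swaps += 1
--             swaps = minHeapify(arr, n, smallest, swaps)
--
--         return swaps
--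
--     def buildMinHeap(arr):
--         swaps = 0
--         for i in range(len(arr) // 2 - 1, -1, -1):
--             swaps = minHeapify(arr, len(arr), i, swaps)
--         return arr, swaps
--
--     def isMinHeap(arr):
--         n = len(arr)
--         for i in range(n // 2 - 1, -1, -1):
--             if 2 * i + 1 < n and arr[i] > arr[2 * i + 1]:
--                 return False
--             if 2 * i + 2 < n and arr[i] > arr[2 * i + 2]:
--                 return False
--         return True
--
--     if isMinHeap(arr):
--         return arr, 0
--     else:
--         return buildMinHeap(arr)
-- ===== SOURCE B (Python) =====
-- def createMinHeap(arr):
--     n = len(arr)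
--     swaps = 0
--     for i in range(n // 2 - 1, -1, -1):
--         j = i
--         while True:
--             smallest = j
--             left = 2 * j + 1
--             right = 2 * j + 2
--             if left < n and arr[j] > arr[left]:
--                 smallest = left
--             if right < n and arr[smallest] > arr[right]:
--                 smallest = right
--             if smallest == j:
--                 break
--             arr[j], arr[smallest] = arr[smallest], arr[j]
--             swaps += 1
--             j = smallest
--     return arr, swaps
-- ===== Notes on version B (the rewrite author's own statement) =====
-- stated objective: simpler
-- what changed: B drops A's redundant isMinHeap pre-check and replaces the recursive minHeapify helper with a single bottom-up heapify loop using an iterative sift-down (explicit j index with break), accumulating swaps in one counter.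
import Mathlib
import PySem

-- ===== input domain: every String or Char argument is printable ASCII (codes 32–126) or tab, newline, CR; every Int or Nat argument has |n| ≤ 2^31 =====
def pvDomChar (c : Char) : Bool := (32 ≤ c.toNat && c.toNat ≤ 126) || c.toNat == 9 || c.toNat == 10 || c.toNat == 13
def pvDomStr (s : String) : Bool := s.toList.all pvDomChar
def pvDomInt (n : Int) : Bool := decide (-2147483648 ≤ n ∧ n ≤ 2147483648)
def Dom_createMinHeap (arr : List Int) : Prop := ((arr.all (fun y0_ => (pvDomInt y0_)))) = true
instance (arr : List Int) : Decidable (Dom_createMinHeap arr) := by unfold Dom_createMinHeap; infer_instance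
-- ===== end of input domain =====

-- B replaces A's recursive sift-down plus redundant isMinHeap pre-check with a single
-- bottom-up heapify using an iterative sift-down (simpler); equivalence is about the
-- RETURN value — both Pythons mutate arr in place (A only in the non-heap branch).

-- ===== PORT A =====
-- all indexing in A is in range (guarded by `left < n` / `right < n`), so getD is exact here
def minHeapify (arr : List Int) (n i : Nat) (swaps : Int) : List Int × Int :=
  let s1 := if 2*i+1 < n ∧ arr.getD i 0 > arr.getD (2*i+1) 0 then 2*i+1 else i
  let s2 := if 2*i+2 < n ∧ arr.getD s1 0 > arr.getD (2*i+2) 0 then 2*i+2 else s1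
  if s2 ≠ i then
    minHeapify ((arr.set i (arr.getD s2 0)).set s2 (arr.getD i 0)) n s2 (swaps + 1)
  else (arr, swaps)
termination_by n - i
decreasing_by
  simp only [s2, s1] at *
  split_ifs at * <;> omega

def buildMinHeap (arr : List Int) : List Int × Int :=
  ((List.range (arr.length / 2)).reverse).foldl
    (fun st i => minHeapify st.1 arr.length i st.2) (arr, 0)

def isMinHeap (arr : List Int) : Bool :=
  let n := arr.length
  ((List.range (n / 2)).reverse).all (fun i =>
    !(decide (2*i+1 < n) && decide (arr.getD i 0 > arr.getD (2*i+1) 0)) &&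
    !(decide (2*i+2 < n) && decide (arr.getD i 0 > arr.getD (2*i+2) 0)))

def createMinHeap (arr : List Int) : List Int × Int :=
  if isMinHeap arr then (arr, 0) else buildMinHeap arr

-- ===== PORT B =====
-- B's `while True` loop: state (arr, j, swaps), break when no child is smaller
def siftLoop (n : Nat) (st : List Int × Nat × Int) : List Int × Int :=
  let arr := st.1
  let j := st.2.1
  let s1 := if 2*j+1 < n ∧ arr.getD j 0 > arr.getD (2*j+1) 0 then 2*j+1 else j
  let s2 := if 2*j+2 < n ∧ arr.getD s1 0 > arr.getD (2*j+2) 0 then 2*j+2 else s1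
  if s2 = j then (arr, st.2.2)
  else siftLoop n ((arr.set j (arr.getD s2 0)).set s2 (arr.getD j 0), s2, st.2.2 + 1)
termination_by n - st.2.1
decreasing_by
  simp only [s2, s1] at *
  split_ifs at * <;> omega

def createMinHeap_alt (arr : List Int) : List Int × Int :=
  ((List.range (arr.length / 2)).reverse).foldl
    (fun st i => siftLoop arr.length (st.1, i, st.2)) (arr, 0)

-- ===== PRECONDITION & SPEC =====
def Spec_createMinHeap (arr : List Int) (out : List Int × Int) : Prop := out = createMinHeap_alt arr
instance (arr : List Int) (out : List Int × Int) : Decidable (Spec_createMinHeap arr out) := by unfold Spec_createMinHeap; infer_instance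

-- ===== CLAIM (what is proved, stated in full; the proofs are below) =====
def Claim_equal_createMinHeap : Prop := ∀ (arr : List Int), Dom_createMinHeap arr → Spec_createMinHeap arr (createMinHeap arr)

-- ===== LEMMAS AND PROOFS =====

-- the iterative sift equals the recursive one
lemma sift_eq (n : Nat) : ∀ (arr : List Int) (i : Nat) (swaps : Int),
    siftLoop n (arr, i, swaps) = minHeapify arr n i swaps := by
  intro arr i swaps
  fun_induction minHeapify arr n i swaps with
  | case1 arr i swaps s1 s2 hne ih =>
    rw [siftLoop]
    exact (if_neg hne).trans ih
  | case2 arr i swaps s1 s2 heq =>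
    rw [siftLoop]
    exact if_pos (not_ne_iff.mp heq)

-- if no child violation at i, one sift is a no-op
lemma minHeapify_noop (arr : List Int) (n i : Nat) (swaps : Int)
    (h1 : ¬ (2*i+1 < n ∧ arr.getD i 0 > arr.getD (2*i+1) 0))
    (h2 : ¬ (2*i+2 < n ∧ arr.getD i 0 > arr.getD (2*i+2) 0)) :
    minHeapify arr n i swaps = (arr, swaps) := by
  rw [minHeapify]
  simp only [if_neg h1]
  simp only [if_neg h2]
  simp

-- a fold of no-op sifts stays put
lemma fold_noop (arr : List Int) (n : Nat) (l : List Nat)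
    (h : ∀ i ∈ l,
      ¬ (2*i+1 < n ∧ arr.getD i 0 > arr.getD (2*i+1) 0) ∧
      ¬ (2*i+2 < n ∧ arr.getD i 0 > arr.getD (2*i+2) 0)) (swaps : Int) :
    l.foldl (fun st i => minHeapify st.1 n i st.2) (arr, swaps) = (arr, swaps) := by
  induction l with
  | nil => rfl
  | cons a t ih =>
    have ha := h a (by simp)
    simp only [List.foldl_cons, minHeapify_noop arr n a swaps ha.1 ha.2]
    exact ih (fun i hi => h i (by simp [hi]))

-- ===== VERDICT (by name: the statement is the Claim_ definition above) =====
theorem createMinHeap_spec : Claim_equal_createMinHeap := by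
  intro arr _
  unfold Spec_createMinHeap createMinHeap createMinHeap_alt buildMinHeap
  have hfold : ((List.range (arr.length / 2)).reverse).foldl
      (fun st i => siftLoop arr.length (st.1, i, st.2)) (arr, 0) =
      ((List.range (arr.length / 2)).reverse).foldl
      (fun st i => minHeapify st.1 arr.length i st.2) (arr, 0) := by
    apply PySem.List.foldl_congr_mem
    intro st i _
    exact sift_eq arr.length st.1 i st.2
  rw [hfold]
  split_ifs with hh
  · symm
    apply fold_noop
    intro i hi
    unfold isMinHeap at hh
    simp only [List.all_eq_true] at hh
    have := hh i hi
    simp only [Bool.and_eq_true, Bool.not_eq_true', Bool.and_eq_false_iff] at this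
    constructor <;> rintro ⟨hx, hy⟩ <;>
      · simp only [decide_eq_true hx, decide_eq_true hy] at this
        tauto
  · rfl
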